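-- pv_equiv track=rewrite | github.com/fialco/adventofcode-2023 | day2/day2_pt2.py | cubes
-- ===== SOURCE A (Python) =====
-- def cubes(games):
--     games = games.split("\n")
--
--     nums = ["1","2","3","4","5","6","7","8","9","0"]
--     col = ["b", "r", "g"]
--     result = 0
--
--     for game in games:
--         game = game.strip()
--         splitter = game.split(":")
--
--         sets = splitter[1]
--         sets = sets.split(";")
--
--         colors = {"b" : 0, "r" : 0, "g" : 0}
--
--         for one_set in sets:
--
--             one_set = one_set.strip()
--             counter = ""
--
--             for i in range(len(one_set)):
--                 if one_set[i] in nums: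
--                     counter += one_set[i]
--                 if one_set[i] in col and one_set[i-1]  not in col:
--                     colors[one_set[i]] = max(int(counter), colors[one_set[i]])
--                     counter = ""
--
--         sub_result = 1
--         for color, num in colors.items():
--             sub_result *= num
--         result += sub_result
--     return result
-- ===== SOURCE B (Python) =====
-- def cubes(games):
--     total = 0
--     for line in games.split("\n"):
--         sets_part = line.strip().split(":")[1]
--         best = {"b": 0, "r": 0, "g": 0}
--         for one_set in sets_part.split(";"):
--             t = one_set.strip()
--             triggers = [i for i in range(len(t))
--                         if t[i] in "brg" and (i == 0 or t[i - 1] not in "brg")]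
--             prev = 0
--             for i in triggers:
--                 value = int("".join(ch for ch in t[prev:i] if ch.isdigit()))
--                 best[t[i]] = max(value, best[t[i]])
--                 prev = i + 1
--         total += best["b"] * best["r"] * best["g"]
--     return total
-- ===== Notes on version B (the rewrite author's own statement) =====
-- stated objective: alternative
-- what changed: Replaces A's single stateful character scan (digit accumulator string plus previous-character check updated per character) by a two-phase decomposition: a comprehension first computes the list of color-trigger positions, then each inter-trigger slice is digested (digits filtered, int, max-update) in a loop over those positions.
-- outside the precondition, e.g. on cubes('a: b1 rb'): A returns 0, B raises ValueError
import Mathlib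
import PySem

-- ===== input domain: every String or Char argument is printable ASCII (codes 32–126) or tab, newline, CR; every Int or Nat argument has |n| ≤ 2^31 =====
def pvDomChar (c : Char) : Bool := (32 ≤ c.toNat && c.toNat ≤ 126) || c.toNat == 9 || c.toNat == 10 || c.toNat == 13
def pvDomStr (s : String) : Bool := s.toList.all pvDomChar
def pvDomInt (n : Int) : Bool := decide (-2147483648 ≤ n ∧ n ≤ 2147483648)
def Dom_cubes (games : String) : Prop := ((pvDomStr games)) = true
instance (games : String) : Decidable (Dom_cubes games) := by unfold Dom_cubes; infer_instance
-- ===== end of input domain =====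

-- B replaces A's stateful character-scan (digit accumulator + previous-character check) by first computing the
-- list of color-trigger positions with a comprehension and then slicing out each inter-trigger segment; same cost,
-- objective: alternative decomposition.

-- ===== PORT A =====
def pvNumsA : List Char := ['1','2','3','4','5','6','7','8','9','0']
def pvColA : List Char := ['b', 'r', 'g']

-- one step of A's `for i in range(len(one_set))` loop; state = (counter, colors)
def pvStepA (t : List Char) (st : List Char × PySem.Dict Char Int) (i : Int) :
    List Char × PySem.Dict Char Int :=
  match PySem.List.pyGet? t i with
  | none => st                          -- unreachable: the loop index satisfies 0 ≤ i < len t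
  | some c =>
    let counter := if c ∈ pvNumsA then st.1 ++ [c] else st.1
    -- one_set[i-1]: the index i-1 is always in range (at i = 0 Python wraps to the last character),
    -- so pyGetD is exact here (the default is never used)
    let prev := PySem.List.pyGetD t (i - 1) c
    if c ∈ pvColA ∧ prev ∉ pvColA then
      match PySem.Int.ofChars? counter with
      | none => ([], st.2)              -- Python raises ValueError (int("")) here — excluded by Pre_
      | some v => ([], st.2.insert c (max v (st.2.getD c 0)))
    else (counter, st.2)

def pvSetA (colors : PySem.Dict Char Int) (one_set : String) : PySem.Dict Char Int :=
  ((PySem.List.pyRange 0 (PySem.Chars.len (PySem.Chars.strip one_set.toList))).foldl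
    (pvStepA (PySem.Chars.strip one_set.toList)) ([], colors)).2

def pvLineA (result : Int) (game : String) : Int :=
  -- splitter = game.strip().split(":")  (":" ≠ "" so split? is always `some`)
  match PySem.List.pyGet? ((PySem.Str.split? (PySem.Str.strip game) ":").getD []) 1 with
  | none => result                      -- Python raises IndexError here — excluded by Pre_
  | some sets0 =>
    result + (((PySem.Str.split? sets0 ";").getD []).foldl pvSetA
      (((PySem.Dict.empty.insert 'b' 0).insert 'r' 0).insert 'g' 0)).items.foldl
        (fun s p => s * p.2) 1

def cubes (games : String) : Int :=
  ((PySem.Str.split? games "\n").getD []).foldl pvLineA 0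

-- ===== PORT B =====
-- best["b"] * best["r"] * best["g"]
def pvBestProd (best : PySem.Dict Char Int) : Int :=
  best.getD 'b' 0 * best.getD 'r' 0 * best.getD 'g' 0

-- `t[i] in "brg" and (i == 0 or t[i-1] not in "brg")` (indices from range(len(t)), always in bounds)
def pvIsTrigB (t : List Char) (i : Nat) : Bool :=
  decide (t.getD i ' ' ∈ (['b', 'r', 'g'] : List Char)) && (decide (i = 0) || !decide (t.getD (i - 1) ' ' ∈ (['b', 'r', 'g'] : List Char)))

-- one step of B's `for i in triggers` loop; state = (prev, best)
def pvStepB (t : List Char) (st : Nat × PySem.Dict Char Int) (i : Nat) :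
    Nat × PySem.Dict Char Int :=
  match PySem.Int.ofChars?
      ((PySem.List.slice t (some (st.1 : Int)) (some (i : Int))).filter PySem.Chars.isdigit) with
  | none => (i + 1, st.2)               -- Python raises ValueError (int("")) here — excluded by Pre_
  | some v =>
    let c := t.getD i ' '
    (i + 1, st.2.insert c (max v (st.2.getD c 0)))

def pvSetB (best : PySem.Dict Char Int) (one_set : String) : PySem.Dict Char Int :=
  (((List.range (PySem.Chars.strip one_set.toList).length).filter
      (pvIsTrigB (PySem.Chars.strip one_set.toList))).foldl
    (pvStepB (PySem.Chars.strip one_set.toList)) (0, best)).2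

def pvLineB (total : Int) (line : String) : Int :=
  match PySem.List.pyGet? ((PySem.Str.split? (PySem.Str.strip line) ":").getD []) 1 with
  | none => total                       -- Python raises IndexError here — excluded by Pre_
  | some sets_part =>
    total + pvBestProd (((PySem.Str.split? sets_part ";").getD []).foldl pvSetB
      (((PySem.Dict.empty.insert 'b' 0).insert 'r' 0).insert 'g' 0))

def cubes_alt (games : String) : Int :=
  ((PySem.Str.split? games "\n").getD []).foldl pvLineB 0

-- ===== PRECONDITION & SPEC =====
-- trigger condition of Pre_ (a color letter not preceded by a color letter), stated on the input only
def pvTrigPre (t : List Char) (i : Nat) : Bool :=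
  decide (t.getD i ' ' ∈ (['b', 'r', 'g'] : List Char)) &&
    (decide (i = 0) || !decide (t.getD (i - 1) ' ' ∈ (['b', 'r', 'g'] : List Char)))

-- every color-letter trigger is preceded by at least one digit since the previous trigger
def pvSegOk (t : List Char) : Bool :=
  (List.range t.length).all fun i =>
    !pvTrigPre t i ||
      (List.range i).any fun j =>
        PySem.Chars.isdigit (t.getD j ' ') &&
          (List.range i).all fun k => !(decide (j < k)) || !pvTrigPre t k

-- Pre_ excludes (a) lines without ':' (A raises IndexError), (b) color letters with no digit since the previous
-- color letter (A raises ValueError on int("")), and (c) sets whose stripped text BEGINS with 'b'/'r'/'g':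
-- there A either raises ValueError or (when the set also ends with such a letter) returns a value produced by
-- negative-index wraparound one_set[-1], while B raises ValueError.
def Pre_cubes (games : String) : Prop :=
  ∀ line ∈ (PySem.Str.split? games "\n").getD [],
    (1 < ((PySem.Str.split? (PySem.Str.strip line) ":").getD []).length) ∧
    ∀ s ∈ (PySem.Str.split?
        (((PySem.Str.split? (PySem.Str.strip line) ":").getD []).getD 1 "") ";").getD [],
      ((PySem.Chars.strip s.toList).getD 0 ' ' ∉ (['b', 'r', 'g'] : List Char)) ∧
      pvSegOk (PySem.Chars.strip s.toList) = true

instance (games : String) : Decidable (Pre_cubes games) := by unfold Pre_cubes; infer_instance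

def pvWitness_cubes : String := "Game 1: 3 blue, 4 red; 1 red, 2 green"

def Spec_cubes (games : String) (out : Int) : Prop := out = cubes_alt games
instance (games : String) (out : Int) : Decidable (Spec_cubes games out) := by unfold Spec_cubes; infer_instance

-- ===== CLAIM (what is proved, stated in full; the proofs are below) =====
def Claim_equal_cubes : Prop := ∀ (games : String), Dom_cubes games → Pre_cubes games → Spec_cubes games (cubes games)

-- ===== LEMMAS AND PROOFS =====

lemma pv_col_eq : (['b', 'r', 'g'] : List Char) = pvColA := rfl

lemma pv_mem_nums_iff (c : Char) : c ∈ pvNumsA ↔ PySem.Chars.isdigit c = true := by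
  constructor
  · intro h; fin_cases h <;> decide
  · intro h
    simp [PySem.Chars.isdigit, Char.le_def] at h
    have h1 : 48 ≤ c.toNat := h.1
    have h2 : c.toNat ≤ 57 := h.2
    have hc : c = Char.ofNat c.toNat := (Char.ofNat_toNat c).symm
    interval_cases h3 : c.toNat <;> subst hc <;> decide

lemma pv_decide_nums : (fun c => decide (c ∈ pvNumsA)) = PySem.Chars.isdigit := by
  funext c
  by_cases h : c ∈ pvNumsA
  · simp [h, (pv_mem_nums_iff c).1 h]
  · simp only [h, decide_false]
    exact (Bool.not_eq_true _).mp (mt (pv_mem_nums_iff c).2 h) |>.symm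

lemma pv_col_not_num {c : Char} (h : c ∈ pvColA) : ¬ (c ∈ pvNumsA) := by
  fin_cases h <;> decide

-- start of the current segment after m characters = one past the last trigger among the first m positions
def pvStart (t : List Char) (m : Nat) : Nat :=
  match ((List.range m).filter (pvIsTrigB t)).getLast? with
  | none => 0
  | some i => i + 1

lemma pv_filter_range_succ (p : Nat → Bool) (m : Nat) :
    (List.range (m + 1)).filter p = (List.range m).filter p ++ (if p m then [m] else []) := by
  cases h : p m <;> simp [List.range_succ, List.filter_append, h]

lemma pvStart_succ_pos {t : List Char} {m : Nat} (h : pvIsTrigB t m = true) :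
    pvStart t (m + 1) = m + 1 := by
  unfold pvStart
  rw [pv_filter_range_succ, if_pos h, List.getLast?_concat]

lemma pvStart_succ_neg {t : List Char} {m : Nat} (h : pvIsTrigB t m = false) :
    pvStart t (m + 1) = pvStart t m := by
  unfold pvStart
  rw [pv_filter_range_succ, if_neg (by simp [h]), List.append_nil]

lemma pvStart_le (t : List Char) (m : Nat) : pvStart t m ≤ m := by
  induction m with
  | zero => exact le_refl 0
  | succ m ih =>
    cases h : pvIsTrigB t m
    · rw [pvStart_succ_neg h]; omega
    · rw [pvStart_succ_pos h]

lemma pv_foldB_fst (t : List Char) (m : Nat) (d : PySem.Dict Char Int) :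
    (((List.range m).filter (pvIsTrigB t)).foldl (pvStepB t) (0, d)).1 = pvStart t m := by
  induction m with
  | zero => rfl
  | succ m ih =>
    rw [pv_filter_range_succ]
    cases h : pvIsTrigB t m
    · rw [if_neg (by simp), List.append_nil, ih, pvStart_succ_neg h]
    · rw [if_pos rfl, List.foldl_append, pvStart_succ_pos h]
      rcases hop : PySem.Int.ofChars?
          ((PySem.List.slice t (some ((((List.range m).filter (pvIsTrigB t)).foldl (pvStepB t)
            (0, d)).1 : Int)) (some (m : Int))).filter PySem.Chars.isdigit) with _ | v <;>
        simp [pvStepB, hop]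

-- A's guard evaluates to B's trigger test (uses: the stripped set does not start with a color letter)
lemma pv_guard_iff {t : List Char} {m : Nat} (hm : m < t.length)
    (hh : t.getD 0 ' ' ∉ pvColA) :
    (t[m] ∈ pvColA ∧ PySem.List.pyGetD t ((m : Int) - 1) t[m] ∉ pvColA) ↔ pvIsTrigB t m = true := by
  unfold pvIsTrigB
  rw [pv_col_eq]
  cases m with
  | zero =>
    have h0 : t.getD 0 ' ' = t[0] := by
      rw [List.getD_eq_getElem?_getD, List.getElem?_eq_getElem hm]; rfl
    rw [h0] at hh
    simp [hh, List.getD_eq_getElem?_getD, List.getElem?_eq_getElem hm]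
  | succ m =>
    have hm' : m < t.length := by omega
    have hc : ((m + 1 : Nat) : Int) - 1 = ((m : Nat) : Int) := by push_cast; ring
    rw [hc, PySem.List.pyGetD_natCast]
    simp [List.getD_eq_getElem?_getD, List.getElem?_eq_getElem hm, List.getElem?_eq_getElem hm']

lemma pv_seg_succ {t : List Char} {s m : Nat} (hs : s ≤ m) (hm : m < t.length) :
    (t.drop s).take (m + 1 - s) = (t.drop s).take (m - s) ++ [t[m]] := by
  have h1 : m + 1 - s = (m - s) + 1 := by omega
  have h2 : (t.drop s)[m - s]? = some t[m] := by
    rw [List.getElem?_drop]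
    rw [show s + (m - s) = m by omega, List.getElem?_eq_getElem hm]
  rw [h1, List.take_add_one, h2]
  rfl

-- the main loop invariant: A's scan state after m characters equals B's trigger-segment view
lemma pv_scan_inv (t : List Char) (hh : t.getD 0 ' ' ∉ pvColA)
    (d : PySem.Dict Char Int) :
    ∀ m, m ≤ t.length →
      (PySem.List.pyRange 0 (m : Int)).foldl (pvStepA t) ([], d)
        = (((t.drop (pvStart t m)).take (m - pvStart t m)).filter (fun c => decide (c ∈ pvNumsA)),
           (((List.range m).filter (pvIsTrigB t)).foldl (pvStepB t) (0, d)).2) := by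
  intro m
  induction m with
  | zero =>
    intro _
    simp [PySem.List.pyRange_one_eq_nil (le_refl (0 : Int)), pvStart]
  | succ m ih =>
    intro h
    have hm : m < t.length := by omega
    have hrange : (((m + 1 : Nat)) : Int) = ((m : Nat) : Int) + 1 := by push_cast; ring
    rw [hrange, PySem.List.pyRange_one_succ_right (by positivity), List.foldl_append,
      ih (by omega)]
    have hgetm : PySem.List.pyGet? t ((m : Nat) : Int) = some t[m] := by
      rw [PySem.List.pyGet?_natCast, List.getElem?_eq_getElem hm]
    have hgetD : t.getD m ' ' = t[m] := by
      rw [List.getD_eq_getElem?_getD, List.getElem?_eq_getElem hm]; rfl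
    have hstart_le := pvStart_le t m
    cases hT : pvIsTrigB t m
    · -- no trigger at m: the dict is unchanged, the counter collects t[m] iff it is a digit
      have hguard : ¬ (t[m] ∈ pvColA ∧ PySem.List.pyGetD t ((m : Int) - 1) t[m] ∉ pvColA) := by
        rw [pv_guard_iff hm hh, hT]; exact Bool.false_ne_true
      rw [pv_filter_range_succ, if_neg (by simp [hT]), List.append_nil,
        pvStart_succ_neg hT]
      simp only [List.foldl_cons, List.foldl_nil, pvStepA, hgetm]
      rw [if_neg hguard]
      rw [pv_seg_succ hstart_le hm, List.filter_append]
      by_cases hd : t[m] ∈ pvNumsA <;> simp [hd]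
    · -- trigger at m: both sides read the same digit string and update the same key
      have hguard : t[m] ∈ pvColA ∧ PySem.List.pyGetD t ((m : Int) - 1) t[m] ∉ pvColA :=
        (pv_guard_iff hm hh).mpr hT
      have hpair : ((List.range m).filter (pvIsTrigB t)).foldl (pvStepB t) (0, d)
          = (pvStart t m, (((List.range m).filter (pvIsTrigB t)).foldl (pvStepB t) (0, d)).2) := by
        rw [← pv_foldB_fst t m d]
      rw [pv_filter_range_succ, if_pos hT, List.foldl_append, hpair]
      simp only [List.foldl_cons, List.foldl_nil, pvStepA, pvStepB, hgetm]
      rw [if_neg (pv_col_not_num hguard.1), if_pos hguard]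
      rw [PySem.List.slice_natCast, ← pv_decide_nums, hgetD, pvStart_succ_pos hT]
      rcases hop : PySem.Int.ofChars?
          (((t.drop (pvStart t m)).take (m - pvStart t m)).filter
            (fun c => decide (c ∈ pvNumsA))) with _ | v <;>
        simp

lemma pv_set_eq (one_set : String) (d : PySem.Dict Char Int)
    (hh : (PySem.Chars.strip one_set.toList).getD 0 ' ' ∉ pvColA) :
    pvSetA d one_set = pvSetB d one_set := by
  unfold pvSetA pvSetB
  rw [PySem.Chars.len_eq]
  rw [pv_scan_inv (PySem.Chars.strip one_set.toList) hh d
    (PySem.Chars.strip one_set.toList).length (le_refl _)]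

-- shape of the colors dict: always exactly the keys 'b', 'r', 'g' in this order
def pvShape (d : PySem.Dict Char Int) : Prop :=
  ∃ x y z, d.items = [('b', x), ('r', y), ('g', z)]

lemma pvShape_insert {d : PySem.Dict Char Int} {c : Char} (hc : c ∈ (['b', 'r', 'g'] : List Char)) (v : Int)
    (h : pvShape d) : pvShape (d.insert c v) := by
  obtain ⟨x, y, z, hi⟩ := h
  have hkeys : d.keys = ['b', 'r', 'g'] := by simp [PySem.Dict.keys, hi]
  have hcont : d.contains c = true := by
    rw [PySem.Dict.contains_iff_mem_keys, hkeys]; fin_cases hc <;> simp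
  have hitems := PySem.Dict.items_insert_of_contains d v hcont
  rw [hi] at hitems
  fin_cases hc
  · exact ⟨v, y, z, by rw [hitems]; rfl⟩
  · exact ⟨x, v, z, by rw [hitems]; rfl⟩
  · exact ⟨x, y, v, by rw [hitems]; rfl⟩

lemma pvShape_foldB (t : List Char) :
    ∀ l : List Nat, (∀ i ∈ l, pvIsTrigB t i = true) → ∀ s d, pvShape d →
      pvShape ((l.foldl (pvStepB t) (s, d)).2) := by
  intro l
  induction l with
  | nil => intro _ s d h; exact h
  | cons i l ih =>
    intro hl s d h
    rw [List.foldl_cons]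
    have hcol : t.getD i ' ' ∈ (['b', 'r', 'g'] : List Char) := by
      have := hl i (List.mem_cons_self)
      unfold pvIsTrigB at this
      simp only [Bool.and_eq_true, decide_eq_true_eq] at this
      exact this.1
    rcases hop : PySem.Int.ofChars?
        ((PySem.List.slice t (some (s : Int)) (some (i : Int))).filter PySem.Chars.isdigit)
      with _ | v <;> simp only [pvStepB, hop]
    · exact ih (fun j hj => hl j (List.mem_cons_of_mem _ hj)) _ _ h
    · exact ih (fun j hj => hl j (List.mem_cons_of_mem _ hj)) _ _ (pvShape_insert hcol _ h)

lemma pvShape_setB (one_set : String) {d : PySem.Dict Char Int} (h : pvShape d) :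
    pvShape (pvSetB d one_set) := by
  unfold pvSetB
  exact pvShape_foldB _ _ (fun i hi => (List.mem_filter.mp hi).2) 0 d h

lemma pvShape_foldSets (sets : List String) :
    ∀ d, pvShape d → pvShape (sets.foldl pvSetB d) := by
  induction sets with
  | nil => intro d h; exact h
  | cons s sets ih => intro d h; exact ih _ (pvShape_setB s h)

lemma pvShape_prod {d : PySem.Dict Char Int} (h : pvShape d) :
    d.items.foldl (fun s p => s * p.2) 1 = d.getD 'b' 0 * d.getD 'r' 0 * d.getD 'g' 0 := by
  obtain ⟨x, y, z, hi⟩ := h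
  have hnd : d.keys.Nodup := by simp [PySem.Dict.keys, hi]
  have hb : d.getD 'b' 0 = x := PySem.Dict.getD_of_mem_items d (by rw [hi]; simp) hnd 0
  have hr : d.getD 'r' 0 = y := PySem.Dict.getD_of_mem_items d (by rw [hi]; simp) hnd 0
  have hg : d.getD 'g' 0 = z := PySem.Dict.getD_of_mem_items d (by rw [hi]; simp) hnd 0
  rw [hi, hb, hr, hg]
  simp [List.foldl]

lemma pv_line_eq (game : String) (r : Int)
    (hline : (1 < ((PySem.Str.split? (PySem.Str.strip game) ":").getD []).length) ∧
      ∀ s ∈ (PySem.Str.split?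
          (((PySem.Str.split? (PySem.Str.strip game) ":").getD []).getD 1 "") ";").getD [],
        ((PySem.Chars.strip s.toList).getD 0 ' ' ∉ (['b', 'r', 'g'] : List Char)) ∧
        pvSegOk (PySem.Chars.strip s.toList) = true) :
    pvLineA r game = pvLineB r game := by
  unfold pvLineA pvLineB
  obtain ⟨hlen, hsets⟩ := hline
  have h1 : PySem.List.pyGet? ((PySem.Str.split? (PySem.Str.strip game) ":").getD []) 1
      = some ((PySem.Str.split? (PySem.Str.strip game) ":").getD [])[1] := by
    rw [show (1 : Int) = ((1 : Nat) : Int) by norm_num, PySem.List.pyGet?_natCast,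
      List.getElem?_eq_getElem hlen]
  have hgd : ((PySem.Str.split? (PySem.Str.strip game) ":").getD []).getD 1 ""
      = ((PySem.Str.split? (PySem.Str.strip game) ":").getD [])[1] := by
    rw [List.getD_eq_getElem?_getD, List.getElem?_eq_getElem hlen]; rfl
  rw [hgd] at hsets
  simp only [h1]
  have hfold : ((PySem.Str.split? ((PySem.Str.split? (PySem.Str.strip game) ":").getD [])[1]
          ";").getD []).foldl pvSetA
        (((PySem.Dict.empty.insert 'b' 0).insert 'r' 0).insert 'g' 0)
      = ((PySem.Str.split? ((PySem.Str.split? (PySem.Str.strip game) ":").getD [])[1]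
          ";").getD []).foldl pvSetB
        (((PySem.Dict.empty.insert 'b' 0).insert 'r' 0).insert 'g' 0) :=
    PySem.List.foldl_congr_mem _ _ _ _
      (fun acc s hs => pv_set_eq s acc (hsets s hs).1)
  rw [hfold, pvShape_prod (pvShape_foldSets _ _ ⟨0, 0, 0, by decide⟩)]
  rfl

-- ===== VERDICT (by name: the statement is the Claim_ definition above) =====
theorem cubes_spec : Claim_equal_cubes := by
  intro games _hdom hpre
  unfold Spec_cubes cubes cubes_alt
  exact PySem.List.foldl_congr_mem _ _ _ _ (fun acc line hmem => pv_line_eq line acc (hpre line hmem))
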